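-- pv_equiv track=rewrite | github.com/olmedocr-university/heuristics | p2-383355-346073/parte-1/schedule2.py | is_not_on_the_same_day
-- ===== SOURCE A (Python) =====
-- mon = range(0, 3)
--
-- tue = range(4, 7)
--
-- wed = range(8, 11)
--
-- thu = range(12, 14)
--
-- def is_not_on_the_same_day(a,b,c,d,e,f):
--     days=[mon,tue,wed,thu]
--     for i in [a,b]:
--         for j in days:
--             if i in j:
--                 for k in [c,d,e,f]:
--                     if k in j:
--                         return False
--     return True
-- ===== SOURCE B (Python) =====
-- mon = range(0, 3)
--
-- tue = range(4, 7)
--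
-- wed = range(8, 11)
--
-- thu = range(12, 14)
--
-- def _day(x):
--     """Weekday index of x, or None if x lies in no day range."""
--     for idx, r in enumerate((mon, tue, wed, thu)):
--         if x in r:
--             return idx
--     return None
--
-- def is_not_on_the_same_day(a, b, c, d, e, f):
--     left = {v for v in map(_day, (a, b)) if v is not None}
--     right = {v for v in map(_day, (c, d, e, f)) if v is not None}
--     return not (left & right)
-- ===== Notes on version B (the rewrite author's own statement) =====
-- stated objective: simpler
-- what changed: Replaces the triple-nested short-circuiting scan by a weekday-index helper: compute the index set of {a,b} and of {c,d,e,f} and return whether the two sets are disjoint.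
import Mathlib
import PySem

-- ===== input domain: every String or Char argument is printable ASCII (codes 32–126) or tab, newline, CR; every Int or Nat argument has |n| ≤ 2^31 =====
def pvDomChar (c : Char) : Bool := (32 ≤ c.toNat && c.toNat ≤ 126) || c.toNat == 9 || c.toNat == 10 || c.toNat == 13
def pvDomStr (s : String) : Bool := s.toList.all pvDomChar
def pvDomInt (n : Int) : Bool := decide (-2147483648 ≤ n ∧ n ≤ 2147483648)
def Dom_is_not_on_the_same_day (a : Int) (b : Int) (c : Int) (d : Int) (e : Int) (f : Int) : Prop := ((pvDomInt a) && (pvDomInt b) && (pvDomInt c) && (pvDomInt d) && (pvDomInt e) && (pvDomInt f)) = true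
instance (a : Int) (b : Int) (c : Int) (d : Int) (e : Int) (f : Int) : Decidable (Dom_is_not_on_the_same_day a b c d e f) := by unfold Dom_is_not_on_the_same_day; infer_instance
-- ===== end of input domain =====

-- B replaces A's triple-nested short-circuiting scan by a weekday-index helper and
-- a disjointness test on the two index sets (objective: simpler).

-- ===== PORT A =====
-- 'i in range(lo, hi)' for an int i
def pvInRange (lo hi i : Int) : Bool := decide (lo ≤ i ∧ i < hi)

-- the four ranges mon/tue/wed/thu as (lo, hi) pairs
def pvDays : List (Int × Int) := [(0, 3), (4, 7), (8, 11), (12, 14)]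

def is_not_on_the_same_day (a : Int) (b : Int) (c : Int) (d : Int) (e : Int) (f : Int) : Bool :=
  -- for i in [a,b]: for j in days: if i in j: for k in [c,d,e,f]: if k in j: return False; return True
  !([a, b].any (fun i =>
      pvDays.any (fun j =>
        pvInRange j.1 j.2 i && [c, d, e, f].any (fun k => pvInRange j.1 j.2 k))))

-- ===== PORT B =====
-- _day(x): first (idx, range) with x in range, else None
def pvDay (x : Int) : Option Int :=
  (([((0:Int), (0:Int), (3:Int)), (1, 4, 7), (2, 8, 11), (3, 12, 14)].find?
      (fun t => pvInRange t.2.1 t.2.2 x)).map (fun t => t.1))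

def is_not_on_the_same_day_alt (a : Int) (b : Int) (c : Int) (d : Int) (e : Int) (f : Int) : Bool :=
  let left : PySem.Set Int := PySem.Set.ofList (([a, b].map pvDay).filterMap id)
  let right : PySem.Set Int := PySem.Set.ofList (([c, d, e, f].map pvDay).filterMap id)
  PySem.Set.isdisjoint left right

-- ===== PRECONDITION & SPEC =====
def Spec_is_not_on_the_same_day (a : Int) (b : Int) (c : Int) (d : Int) (e : Int) (f : Int) (out : Bool) : Prop := out = is_not_on_the_same_day_alt a b c d e f
instance (a : Int) (b : Int) (c : Int) (d : Int) (e : Int) (f : Int) (out : Bool) : Decidable (Spec_is_not_on_the_same_day a b c d e f out) := by unfold Spec_is_not_on_the_same_day; infer_instance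

-- ===== CLAIM (what is proved, stated in full; the proofs are below) =====
def Claim_equal_is_not_on_the_same_day : Prop := ∀ (a : Int) (b : Int) (c : Int) (d : Int) (e : Int) (f : Int), Dom_is_not_on_the_same_day a b c d e f → Spec_is_not_on_the_same_day a b c d e f (is_not_on_the_same_day a b c d e f)

-- ===== LEMMAS AND PROOFS =====

-- pvDay as nested ifs
theorem pvDay_eq (x : Int) : pvDay x =
    if 0 ≤ x ∧ x < 3 then some 0
    else if 4 ≤ x ∧ x < 7 then some 1
    else if 8 ≤ x ∧ x < 11 then some 2
    else if 12 ≤ x ∧ x < 14 then some 3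
    else none := by
  by_cases H0 : 0 ≤ x ∧ x < 3 <;> by_cases H1 : 4 ≤ x ∧ x < 7 <;>
    by_cases H2 : 8 ≤ x ∧ x < 11 <;> by_cases H3 : 12 ≤ x ∧ x < 14 <;>
    simp [pvDay, pvInRange, List.find?, H0, H1, H2, H3]

-- x lies in day range (lo,hi) with index n  ↔  pvDay x = some n   (per concrete day)
theorem day0_iff (x : Int) : pvInRange 0 3 x = true ↔ pvDay x = some 0 := by
  rw [pvDay_eq]; simp [pvInRange]; split_ifs <;> simp_all <;> try omega
theorem day1_iff (x : Int) : pvInRange 4 7 x = true ↔ pvDay x = some 1 := by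
  rw [pvDay_eq]; simp [pvInRange]; split_ifs <;> simp_all <;> try omega
theorem day2_iff (x : Int) : pvInRange 8 11 x = true ↔ pvDay x = some 2 := by
  rw [pvDay_eq]; simp [pvInRange]; split_ifs <;> simp_all <;> try omega
theorem day3_iff (x : Int) : pvInRange 12 14 x = true ↔ pvDay x = some 3 := by
  rw [pvDay_eq]; simp [pvInRange]; split_ifs <;> simp_all <;> try omega

-- if pvDay x = some v then v is one of the four day indices with its range containing x
theorem pvDay_some_cases (x v : Int) (h : pvDay x = some v) :
    (v = 0 ∧ pvInRange 0 3 x = true) ∨ (v = 1 ∧ pvInRange 4 7 x = true) ∨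
    (v = 2 ∧ pvInRange 8 11 x = true) ∨ (v = 3 ∧ pvInRange 12 14 x = true) := by
  rw [pvDay_eq] at h
  split_ifs at h <;> simp_all [pvInRange]

-- A's nested scan, as a proposition: some shared day exists
theorem A_false_iff (a b c d e f : Int) :
    (is_not_on_the_same_day a b c d e f = false) ↔
    ∃ v, (∃ i ∈ [a, b], pvDay i = some v) ∧ (∃ k ∈ [c, d, e, f], pvDay k = some v) := by
  simp only [is_not_on_the_same_day, Bool.not_eq_false', List.any_eq_true, Bool.and_eq_true]
  constructor
  · rintro ⟨i, hi, j, hj, hij, k, hk, hkj⟩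
    simp only [pvDays, List.mem_cons, List.not_mem_nil, or_false] at hj
    rcases hj with h | h | h | h <;> subst h <;>
      [exact ⟨0, ⟨i, hi, (day0_iff i).1 hij⟩, ⟨k, hk, (day0_iff k).1 hkj⟩⟩;
       exact ⟨1, ⟨i, hi, (day1_iff i).1 hij⟩, ⟨k, hk, (day1_iff k).1 hkj⟩⟩;
       exact ⟨2, ⟨i, hi, (day2_iff i).1 hij⟩, ⟨k, hk, (day2_iff k).1 hkj⟩⟩;
       exact ⟨3, ⟨i, hi, (day3_iff i).1 hij⟩, ⟨k, hk, (day3_iff k).1 hkj⟩⟩]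
  · rintro ⟨v, ⟨i, hi, hiv⟩, k, hk, hkv⟩
    rcases pvDay_some_cases i v hiv with ⟨rfl, hr⟩ | ⟨rfl, hr⟩ | ⟨rfl, hr⟩ | ⟨rfl, hr⟩
    · exact ⟨i, hi, (0, 3), by simp [pvDays], hr, k, hk, (day0_iff k).2 hkv⟩
    · exact ⟨i, hi, (4, 7), by simp [pvDays], hr, k, hk, (day1_iff k).2 hkv⟩
    · exact ⟨i, hi, (8, 11), by simp [pvDays], hr, k, hk, (day2_iff k).2 hkv⟩
    · exact ⟨i, hi, (12, 14), by simp [pvDays], hr, k, hk, (day3_iff k).2 hkv⟩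

-- B, as the same proposition
theorem B_false_iff (a b c d e f : Int) :
    (is_not_on_the_same_day_alt a b c d e f = false) ↔
    ∃ v, (∃ i ∈ [a, b], pvDay i = some v) ∧ (∃ k ∈ [c, d, e, f], pvDay k = some v) := by
  simp only [is_not_on_the_same_day_alt]
  rw [Bool.eq_false_iff, Ne, PySem.Set.isdisjoint_iff]
  push Not
  constructor
  · rintro ⟨v, hv₁, hv₂⟩
    rw [PySem.Set.mem_ofList] at hv₁ hv₂
    simp only [List.mem_filterMap, List.mem_map, id_eq] at hv₁ hv₂
    obtain ⟨o₁, ⟨i, hi, rfl⟩, h₁⟩ := hv₁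
    obtain ⟨o₂, ⟨k, hk, rfl⟩, h₂⟩ := hv₂
    exact ⟨v, ⟨i, hi, h₁⟩, ⟨k, hk, h₂⟩⟩
  · rintro ⟨v, ⟨i, hi, hiv⟩, k, hk, hkv⟩
    refine ⟨v, ?_, ?_⟩ <;> rw [PySem.Set.mem_ofList] <;>
      simp only [List.mem_filterMap, List.mem_map, id_eq]
    · exact ⟨pvDay i, ⟨i, hi, rfl⟩, hiv⟩
    · exact ⟨pvDay k, ⟨k, hk, rfl⟩, hkv⟩

-- ===== VERDICT (by name: the statement is the Claim_ definition above) =====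
theorem is_not_on_the_same_day_spec : Claim_equal_is_not_on_the_same_day := by
  intro a b c d e f _
  unfold Spec_is_not_on_the_same_day
  rcases hB : is_not_on_the_same_day_alt a b c d e f with _ | _
  · exact (A_false_iff a b c d e f).2 ((B_false_iff a b c d e f).1 hB)
  · rcases hA : is_not_on_the_same_day a b c d e f with _ | _
    · exact absurd ((B_false_iff a b c d e f).2 ((A_false_iff a b c d e f).1 hA))
        (by simp [hB])
    · rfl
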